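-- pv_equiv track=rewrite | github.com/lsgrep/gterm | gterm/executor.py | _is_safe_http_read
-- ===== SOURCE A (Python) =====
-- def _is_safe_http_read(args: list[str]) -> bool:
--     method = "GET"
--     for index, arg in enumerate(args):
--         if arg in {"-X", "--request"}:
--             if index + 1 >= len(args):
--                 return False
--             method = args[index + 1].upper()
--         elif arg.startswith("--request="):
--             method = arg.split("=", 1)[1].upper()
--         elif arg.startswith("-X") and len(arg) > 2:
--             method = arg[2:].upper()
--
--         if arg in {
--             "-d",
--             "--data",
--             "--data-raw",
--             "--data-binary",
--             "--form",
--             "-F",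
--             "--upload-file",
--             "-T",
--             "-o",
--             "--output",
--             "-O",
--             "--remote-name",
--         }:
--             return False
--         if arg.startswith(("--data=", "--data-raw=", "--data-binary=", "--form=", "--output=")):
--             return False
--
--     return method in {"GET", "HEAD"}
-- ===== SOURCE B (Python) =====
-- FORBIDDEN = {
--     "-d", "--data", "--data-raw", "--data-binary", "--form", "-F",
--     "--upload-file", "-T", "-o", "--output", "-O", "--remote-name",
-- }
-- FORBIDDEN_PREFIXES = ("--data=", "--data-raw=", "--data-binary=", "--form=", "--output=")
--
--
-- def _is_safe_http_read(args: list[str]) -> bool: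
--     # a method flag dangling at the very end can never supply a method
--     if args and args[-1] in ("-X", "--request"):
--         return False
--     # any write/output option anywhere makes the command unsafe
--     if any(a in FORBIDDEN or a.startswith(FORBIDDEN_PREFIXES) for a in args):
--         return False
--     # the LAST method-setting argument wins: scan backwards, carrying the
--     # element that follows the current one (the value of a bare -X/--request)
--     nxt = ""
--     for a in reversed(args):
--         if a in ("-X", "--request"):
--             return nxt.upper() in ("GET", "HEAD")
--         if a.startswith("--request="):
--             return a.split("=", 1)[1].upper() in ("GET", "HEAD")
--         if a.startswith("-X") and len(a) > 2:
--             return a[2:].upper() in ("GET", "HEAD")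
--         nxt = a
--     return True  # no method flag: curl defaults to GET
-- ===== Notes on version B (the rewrite author's own statement) =====
-- stated objective: simpler
-- what changed: A's single forward enumerate-loop with interleaved early returns is decomposed into three independent passes: a dangling last -X/--request check, an any() pass for forbidden write/output options, and a backward scan (last method flag wins) that carries the following element instead of indexing.
import Mathlib
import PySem

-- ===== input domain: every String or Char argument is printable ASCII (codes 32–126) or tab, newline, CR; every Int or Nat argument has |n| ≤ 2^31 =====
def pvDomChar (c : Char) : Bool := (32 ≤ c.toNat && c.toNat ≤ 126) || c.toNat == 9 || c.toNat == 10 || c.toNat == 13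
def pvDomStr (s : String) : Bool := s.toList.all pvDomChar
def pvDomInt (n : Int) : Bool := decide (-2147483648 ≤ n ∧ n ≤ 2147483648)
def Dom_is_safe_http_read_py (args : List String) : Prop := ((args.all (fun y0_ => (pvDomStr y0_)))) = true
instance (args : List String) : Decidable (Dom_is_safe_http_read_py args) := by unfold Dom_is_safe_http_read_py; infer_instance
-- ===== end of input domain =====

-- B replaces A's single forward loop by three independent passes: a dangling-flag
-- check on the last element, an any() pass over all args for write/output options,
-- and a single BACKWARD scan (last method flag wins) carrying the following element;
-- objective: simpler decomposition, same cost.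

-- ===== PORT A =====
-- A: one forward loop over enumerate(args) tracking `method`, with early returns.
def aLoop (args : List String) : Nat → List String → String → Bool
  | _, [], method => method == "GET" || method == "HEAD"
  | index, arg :: rest, method =>
    -- the forbidden-argument checks that close each loop iteration in A
    let cont : String → Bool := fun method =>
      if arg ∈ ["-d", "--data", "--data-raw", "--data-binary", "--form", "-F",
                "--upload-file", "-T", "-o", "--output", "-O", "--remote-name"] then false
      else if ["--data=", "--data-raw=", "--data-binary=", "--form=", "--output="].any
                (fun p => PySem.Str.startswith arg p) then false
      else aLoop args (index + 1) rest method
    if arg == "-X" || arg == "--request" then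
      if (args.length : Int) ≤ (index : Int) + 1 then false
      else cont (PySem.Str.upper ((PySem.List.pyGet? args ((index : Int) + 1)).getD ""))
    else if PySem.Str.startswith arg "--request=" then
      cont (PySem.Str.upper (PySem.List.pyGetD ((PySem.Str.splitMax? arg "=" 1).getD []) 1 ""))
    else if PySem.Str.startswith arg "-X" && decide (2 < PySem.Str.len arg) then
      cont (PySem.Str.upper (PySem.Str.slice arg (some 2) none))
    else cont method

def is_safe_http_read_py (args : List String) : Bool := aLoop args 0 args "GET"

-- ===== PORT B =====
def bForbidden : List String :=
  ["-d", "--data", "--data-raw", "--data-binary", "--form", "-F",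
   "--upload-file", "-T", "-o", "--output", "-O", "--remote-name"]

def bPrefixes : List String := ["--data=", "--data-raw=", "--data-binary=", "--form=", "--output="]

def bIsWrite (a : String) : Bool :=
  decide (a ∈ bForbidden) || bPrefixes.any (fun p => PySem.Str.startswith a p)

-- backward scan over reversed(args); `nxt` is the element following `a` in args
def bScan : List String → String → Bool
  | [], _ => true
  | a :: rest, nxt =>
    if a == "-X" || a == "--request" then
      PySem.Str.upper nxt == "GET" || PySem.Str.upper nxt == "HEAD"
    else if PySem.Str.startswith a "--request=" then
      let m := PySem.Str.upper (PySem.List.pyGetD ((PySem.Str.splitMax? a "=" 1).getD []) 1 "")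
      m == "GET" || m == "HEAD"
    else if PySem.Str.startswith a "-X" && decide (2 < PySem.Str.len a) then
      let m := PySem.Str.upper (PySem.Str.slice a (some 2) none)
      m == "GET" || m == "HEAD"
    else bScan rest a

def is_safe_http_read_py_alt (args : List String) : Bool :=
  if decide (args ≠ []) &&
      ((PySem.List.pyGet? args (-1)).getD "" == "-X" ||
       (PySem.List.pyGet? args (-1)).getD "" == "--request") then false
  else if args.any bIsWrite then false
  else bScan args.reverse ""

-- ===== PRECONDITION & SPEC =====
def Spec_is_safe_http_read_py (args : List String) (out : Bool) : Prop := out = is_safe_http_read_py_alt args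
instance (args : List String) (out : Bool) : Decidable (Spec_is_safe_http_read_py args out) := by unfold Spec_is_safe_http_read_py; infer_instance

-- ===== CLAIM (what is proved, stated in full; the proofs are below) =====
def Claim_equal_is_safe_http_read_py : Prop := ∀ (args : List String), Dom_is_safe_http_read_py args → Spec_is_safe_http_read_py args (is_safe_http_read_py args)

-- ===== LEMMAS AND PROOFS =====

-- the final value of A's `method` variable over the list `l`, where `nxt` is the
-- element that follows `l` in the full argument list ("" if none)
def finalM : List String → String → String → String
  | [], _, m => m
  | a :: rest, nxt, m =>
    finalM rest nxt
      (if a == "-X" || a == "--request" then PySem.Str.upper (rest.headD nxt)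
       else if PySem.Str.startswith a "--request=" then
         PySem.Str.upper (PySem.List.pyGetD ((PySem.Str.splitMax? a "=" 1).getD []) 1 "")
       else if PySem.Str.startswith a "-X" && decide (2 < PySem.Str.len a) then
         PySem.Str.upper (PySem.Str.slice a (some 2) none)
       else m)

def inGH (m : String) : Bool := m == "GET" || m == "HEAD"

theorem headD_append_singleton {α : Type} (l : List α) (a : α) (nxt : α) :
    (l ++ [a]).headD nxt = l.headD a := by
  cases l <;> rfl

theorem finalM_snoc (l : List String) (a nxt m : String) :
    finalM (l ++ [a]) nxt m =
      (if a == "-X" || a == "--request" then PySem.Str.upper nxt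
       else if PySem.Str.startswith a "--request=" then
         PySem.Str.upper (PySem.List.pyGetD ((PySem.Str.splitMax? a "=" 1).getD []) 1 "")
       else if PySem.Str.startswith a "-X" && decide (2 < PySem.Str.len a) then
         PySem.Str.upper (PySem.Str.slice a (some 2) none)
       else finalM l a m) := by
  induction l generalizing m with
  | nil => simp [finalM]
  | cons b l ih =>
    simp only [List.cons_append, finalM, headD_append_singleton]
    rw [ih]

theorem bScan_rev (l : List String) (nxt : String) :
    bScan l.reverse nxt = inGH (finalM l nxt "GET") := by
  induction l using List.reverseRecOn generalizing nxt with
  | nil => simp [bScan, finalM, inGH]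
  | append_singleton l a ih =>
    rw [List.reverse_append, List.reverse_singleton, List.singleton_append,
        finalM_snoc]
    simp only [bScan]
    split_ifs with h1 h2 h3 <;> simp [inGH, ih]

theorem aLoop_char (args : List String) :
    ∀ (pending : List String) (idx : Nat) (m : String), args.drop idx = pending →
      aLoop args idx pending m = ((!pending.any bIsWrite) && inGH (finalM pending "" m)) := by
  intro pending
  induction pending with
  | nil => intro idx m _; simp [aLoop, finalM, inGH]
  | cons a rest ih =>
    intro idx m hdrop
    have hrest : args.drop (idx + 1) = rest := by
      rw [← List.tail_drop, hdrop]; rfl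
    have hlen : args.length = idx + 1 + rest.length := by
      have h1 : (args.drop idx).length = args.length - idx := List.length_drop
      rw [hdrop] at h1
      have h2 : idx ≤ args.length := by
        by_contra h
        have hnil : args.drop idx = [] := List.drop_eq_nil_of_le (by omega)
        rw [hdrop] at hnil; exact absurd hnil (by simp)
      simp at h1; omega
    have hcont : ∀ m' : String,
        (if a ∈ ["-d", "--data", "--data-raw", "--data-binary", "--form", "-F",
                  "--upload-file", "-T", "-o", "--output", "-O", "--remote-name"] then false
         else if (["--data=", "--data-raw=", "--data-binary=", "--form=", "--output="].any
                   (fun p => PySem.Str.startswith a p)) = true then false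
         else aLoop args (idx + 1) rest m')
        = ((!(bIsWrite a || rest.any bIsWrite)) && inGH (finalM rest "" m')) := by
      intro m'
      split_ifs with g1 g2
      · have hw : bIsWrite a = true := by simp [bIsWrite, bForbidden, g1]
        rw [hw]; simp
      · have hw : bIsWrite a = true := by
          simp only [bIsWrite, bForbidden, bPrefixes]
          simp only [List.any_cons, List.any_nil] at g2
          simp at g2 ⊢
          tauto
        rw [hw]; simp
      · have hw : bIsWrite a = false := by
          simp only [bIsWrite, bForbidden, bPrefixes]
          simp only [List.any_cons, List.any_nil] at g2
          simp at g1 g2 ⊢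
          tauto
        rw [ih (idx + 1) m' hrest, hw]; simp
    simp only [aLoop]
    by_cases hf : (a == "-X" || a == "--request") = true
    · rw [if_pos hf]
      cases rest with
      | nil =>
        rw [if_pos (by simp only [List.length_nil, Nat.add_zero] at hlen; rw [hlen]; push_cast; omega)]
        have hw : bIsWrite a = false := by
          rcases Bool.or_eq_true_iff.mp hf with h | h <;> (rw [beq_iff_eq] at h; subst h; decide)
        have hfm : finalM [a] "" m = PySem.Str.upper "" := by
          simp only [finalM, List.headD_nil]
          rw [if_pos hf]
        have hgh : inGH (PySem.Str.upper "") = false := by decide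
        rw [hfm, hgh]
        simp
      | cons b rest' =>
        rw [if_neg (by rw [hlen]; push_cast; simp)]
        have hget : PySem.List.pyGet? args ((idx : Int) + 1) = some b := by
          have hc : ((idx : Int) + 1) = ((idx + 1 : Nat) : Int) := by push_cast; ring
          rw [hc, PySem.List.pyGet?_natCast]
          have hd : args[idx + 1]? = (args.drop (idx + 1))[0]? := by
            rw [List.getElem?_drop]
          rw [hd, hrest]; rfl
        rw [hget, Option.getD_some, hcont _]
        have hfm : finalM (a :: b :: rest') "" m
            = finalM (b :: rest') "" (PySem.Str.upper b) := by
          simp only [finalM, List.headD_cons]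
          rw [if_pos hf]
        rw [hfm]
        simp [List.any_cons]
    · rw [if_neg hf]
      by_cases h2 : PySem.Str.startswith a "--request=" = true
      · rw [if_pos h2, hcont _]
        have hfm : finalM (a :: rest) "" m = finalM rest ""
            (PySem.Str.upper (PySem.List.pyGetD ((PySem.Str.splitMax? a "=" 1).getD []) 1 "")) := by
          simp only [finalM]
          rw [if_neg hf, if_pos h2]
        rw [hfm]
        simp [List.any_cons]
      · rw [if_neg h2]
        by_cases h3 : (PySem.Str.startswith a "-X" && decide (2 < PySem.Str.len a)) = true
        · rw [if_pos h3, hcont _]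
          have hfm : finalM (a :: rest) "" m = finalM rest ""
              (PySem.Str.upper (PySem.Str.slice a (some 2) none)) := by
            simp only [finalM]
            rw [if_neg hf, if_neg h2, if_pos h3]
          rw [hfm]
          simp [List.any_cons]
        · rw [if_neg h3, hcont _]
          have hfm : finalM (a :: rest) "" m = finalM rest "" m := by
            simp only [finalM]
            rw [if_neg hf, if_neg h2, if_neg h3]
          rw [hfm]
          simp [List.any_cons]

-- ===== VERDICT (by name: the statement is the Claim_ definition above) =====
theorem is_safe_http_read_py_spec : Claim_equal_is_safe_http_read_py := by
  intro args _
  show is_safe_http_read_py args = is_safe_http_read_py_alt args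
  rw [is_safe_http_read_py, aLoop_char args args 0 "GET" (by simp)]
  unfold is_safe_http_read_py_alt
  by_cases hne : args = []
  · subst hne; decide
  · rw [decide_eq_true hne]
    have hlast : (PySem.List.pyGet? args (-1)).getD "" = args.getLast hne := by
      rw [PySem.List.pyGet?_neg_one, List.getLast?_eq_some_getLast]
      rfl
    by_cases hflag : (args.getLast hne == "-X" || args.getLast hne == "--request") = true
    · rw [hlast]
      rw [if_pos (by simp [hflag])]
      have hdec : args = args.dropLast ++ [args.getLast hne] :=
        (List.dropLast_append_getLast hne).symm
      rw [hdec, finalM_snoc, if_pos hflag]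
      have : PySem.Str.upper "" = "" := by decide
      rw [this]
      simp [inGH]
    · rw [hlast, if_neg (by simp_all)]
      rw [bScan_rev]
      cases h : args.any bIsWrite <;> simp
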